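-- pv_equiv track=rewrite | github.com/K1521/geometricalgebra1 | old/blademulexplained.py | blademulsimple1
-- ===== SOURCE A (Python) =====
-- def binit(x,l=8):
--     return [t=="1"for t in f"{x:{l}b}"]
--
-- def blademulsimple1(b1,b2):
--     count=False
--     invert=False
--     for a,b in zip(binit(b1)[::-1],binit(b2)[::-1]):
--         count^=b
--         if a:
--             invert^=count
--
--     return invert
-- ===== SOURCE B (Python) =====
-- def binit(x,l=8):
--     return [t=="1"for t in f"{x:{l}b}"]
--
-- def swaps(xs,ys):
--     # number of index pairs (i,j), j<=i, with xs[i] and ys[j] both set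
--     if not xs or not ys:
--         return 0
--     return (sum(xs) if ys[0] else 0) + swaps(xs[1:],ys[1:])
--
-- def blademulsimple1(b1,b2):
--     r1=binit(b1)[::-1]
--     r2=binit(b2)[::-1]
--     m=min(len(r1),len(r2))
--     return bool(swaps(r1[:m],r2[:m])&1)
-- ===== Notes on version B (the rewrite author's own statement) =====
-- stated objective: alternative
-- what changed: B counts the total number of transposed index pairs in the natural numbers with a recursive pair-counting function (popcount of the remaining b1 suffix for each set b2 bit) and takes the parity once at the end, instead of A's single streaming loop XOR-accumulating a running prefix parity.
import Mathlib
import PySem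

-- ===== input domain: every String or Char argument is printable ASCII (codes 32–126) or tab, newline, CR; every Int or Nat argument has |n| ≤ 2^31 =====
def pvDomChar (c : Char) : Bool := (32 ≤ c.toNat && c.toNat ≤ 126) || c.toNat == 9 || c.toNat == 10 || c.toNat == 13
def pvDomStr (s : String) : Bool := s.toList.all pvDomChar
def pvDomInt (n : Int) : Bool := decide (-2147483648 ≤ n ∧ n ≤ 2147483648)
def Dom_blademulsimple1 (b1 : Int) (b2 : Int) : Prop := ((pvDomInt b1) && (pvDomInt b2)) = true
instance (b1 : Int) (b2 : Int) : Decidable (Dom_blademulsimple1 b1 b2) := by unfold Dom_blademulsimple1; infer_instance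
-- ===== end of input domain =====

-- B counts transposed index pairs in Nat with a recursive pair-counter and takes the parity once at the end, instead of A's streaming XOR of a running prefix parity (objective: alternative; B is quadratic, A linear).


-- ===== PORT A =====
-- f"{x:8b}" : binary digits of |x|, '-' sign if negative, right-aligned in 8 with spaces (exact on all Int)
def pyFormatB (x : Int) (l : Nat) : List Char :=
  let s := (if x < 0 then ['-'] else []) ++ Nat.toDigits 2 x.natAbs
  List.replicate (l - s.length) ' ' ++ s

-- binit(x): [t=="1" for t in f"{x:8b}"]
def binit (x : Int) : List Bool := (pyFormatB x 8).map (fun t => t == '1')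

def blademulsimple1 (b1 : Int) (b2 : Int) : Bool :=
  (((binit b1).reverse.zip (binit b2).reverse).foldl
    (fun (st : Bool × Bool) ab =>
      let count := st.1 ^^ ab.2
      (count, if ab.1 then st.2 ^^ count else st.2))
    (false, false)).2

-- ===== PORT B =====
-- sum(xs) over a list of bools
def pySum (xs : List Bool) : Nat := xs.foldl (fun s t => s + if t then 1 else 0) 0

-- swaps(xs, ys): number of index pairs (i, j), j <= i, with xs[i] and ys[j] both set
def swapsN : List Bool → List Bool → Nat
  | [], _ => 0
  | _ :: _, [] => 0
  | x :: xs, y :: ys => (if y then pySum (x :: xs) else 0) + swapsN xs ys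

def blademulsimple1_alt (b1 : Int) (b2 : Int) : Bool :=
  let r1 := (binit b1).reverse
  let r2 := (binit b2).reverse
  let m := min r1.length r2.length
  swapsN (r1.take m) (r2.take m) % 2 == 1

-- ===== PRECONDITION & SPEC =====
def Spec_blademulsimple1 (b1 : Int) (b2 : Int) (out : Bool) : Prop := out = blademulsimple1_alt b1 b2
instance (b1 : Int) (b2 : Int) (out : Bool) : Decidable (Spec_blademulsimple1 b1 b2 out) := by unfold Spec_blademulsimple1; infer_instance

-- ===== CLAIM (what is proved, stated in full; the proofs are below) =====
def Claim_equal_blademulsimple1 : Prop := ∀ (b1 : Int) (b2 : Int), Dom_blademulsimple1 b1 b2 → Spec_blademulsimple1 b1 b2 (blademulsimple1 b1 b2)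

-- ===== LEMMAS AND PROOFS =====

theorem parity_add (a b : Nat) : ((a + b) % 2 == 1) = ((a % 2 == 1) ^^ (b % 2 == 1)) := by
  have ha : a % 2 = 0 ∨ a % 2 = 1 := by omega
  have hb : b % 2 = 0 ∨ b % 2 = 1 := by omega
  have hab : (a + b) % 2 = (a % 2 + b % 2) % 2 := by omega
  rcases ha with h1 | h1 <;> rcases hb with h2 | h2 <;> simp [hab, h1, h2]

theorem pySum_foldl (xs : List Bool) (s : Nat) :
    xs.foldl (fun s t => s + if t then 1 else 0) s = s + pySum xs := by
  induction xs generalizing s with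
  | nil => simp [pySum]
  | cons x xs ih =>
    simp only [pySum, List.foldl]
    rw [ih, ih]
    omega

theorem pySum_cons (x : Bool) (xs : List Bool) :
    pySum (x :: xs) = (if x then 1 else 0) + pySum xs := by
  simp only [pySum, List.foldl]
  rw [pySum_foldl, pySum_foldl]
  omega

-- parity of the set bits of x :: xs
theorem pySum_parity_cons (x : Bool) (xs : List Bool) :
    (pySum (x :: xs) % 2 == 1) = (x ^^ (pySum xs % 2 == 1)) := by
  rw [pySum_cons]
  cases x <;> simp [parity_add]

-- peeling one pair off the swap count, at the parity level
theorem swaps_parity_cons (x y : Bool) (xs ys : List Bool) :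
    (swapsN (x :: xs) (y :: ys) % 2 == 1)
      = ((y && (x ^^ (pySum xs % 2 == 1))) ^^ (swapsN xs ys % 2 == 1)) := by
  rw [← pySum_parity_cons]
  simp only [swapsN]
  cases y <;> simp [parity_add]

-- the boolean identity behind the induction step of core_eq
theorem step_bool (x y c i P S : Bool) :
    ((if x then i ^^ (c ^^ y) else i) ^^ ((c ^^ y) && P) ^^ S)
      = (i ^^ (c && (x ^^ P)) ^^ ((y && (x ^^ P)) ^^ S)) := by
  cases x <;> cases y <;> cases c <;> cases i <;> cases P <;> cases S <;> decide

-- A's fused loop, on equal-length lists, computes i xor (c and parity(popcount xs)) xor parity(swapsN xs ys)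
theorem core_eq (xs ys : List Bool) (h : xs.length = ys.length) (c i : Bool) :
    ((xs.zip ys).foldl
      (fun (st : Bool × Bool) ab =>
        let count := st.1 ^^ ab.2
        (count, if ab.1 then st.2 ^^ count else st.2)) (c, i)).2
    = (i ^^ (c && (pySum xs % 2 == 1)) ^^ (swapsN xs ys % 2 == 1)) := by
  induction xs generalizing ys c i with
  | nil =>
    cases ys with
    | nil => simp [swapsN, pySum]
    | cons b ys => simp at h
  | cons x xs ih =>
    cases ys with
    | nil => simp at h
    | cons y ys =>
      simp only [List.zip_cons_cons, List.foldl]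
      rw [ih ys (by simpa using h) (c ^^ y) (if x then i ^^ (c ^^ y) else i)]
      rw [swaps_parity_cons, pySum_parity_cons]
      exact step_bool x y c i (pySum xs % 2 == 1) (swapsN xs ys % 2 == 1)

-- zip only sees the min-length prefixes
theorem zip_take_min (xs ys : List Bool) :
    xs.zip ys = (xs.take (min xs.length ys.length)).zip (ys.take (min xs.length ys.length)) := by
  induction xs generalizing ys with
  | nil => simp
  | cons x xs ih =>
    cases ys with
    | nil => simp
    | cons y ys =>
      have hmin : min (x :: xs).length (y :: ys).length = min xs.length ys.length + 1 := by
        simp only [List.length_cons]; omega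
      rw [hmin, List.take_succ_cons, List.take_succ_cons, List.zip_cons_cons, List.zip_cons_cons]
      exact congrArg _ (ih ys)

-- ===== VERDICT (by name: the statement is the Claim_ definition above) =====
theorem blademulsimple1_spec : Claim_equal_blademulsimple1 := by
  intro b1 b2 _
  unfold Spec_blademulsimple1
  simp only [blademulsimple1, blademulsimple1_alt]
  rw [zip_take_min]
  rw [core_eq _ _ (by simp only [List.length_take]; omega)]
  simp
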